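-- pv_equiv track=rewrite | github.com/tangoat2019/EPI_Python | Interview Prep/Microsoft/min_swap_palindrome.py | find_swap_step
-- ===== SOURCE A (Python) =====
-- def find_swap_step(s:str, sW: str, N: int)-> int:
-- 	res, s1, s2, i, j = 0, list(s), list(sW), 0, 0
-- 	while i < N:
-- 		j = i
-- 		while s1[i] != s2[j]:
-- 			j += 1
-- 		while i < j:
-- 			s2[j], s2[j-1]= s2[j-1], s2[j]
-- 			j -= 1
-- 			res += 1
-- 		i += 1
-- 	return res
-- ===== SOURCE B (Python) =====
-- def find_swap_step(s: str, sW: str, N: int) -> int: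
--     # Keep only the not-yet-matched remainder: the cost of matching s[i] is the
--     # position of its first occurrence in the remainder, which is then removed.
--     rest = list(sW)
--     res = 0
--     for i in range(N):
--         j = rest.index(s[i])
--         res += j
--         rest.pop(j)
--     return res
-- ===== Notes on version B (the rewrite author's own statement) =====
-- stated objective: simpler
-- what changed: A simulates every adjacent swap, bubbling the matched character down with an explicit inner swap loop over a fixed-size array; B keeps only the not-yet-matched remainder list, adds the index of the first occurrence of s[i] in it and removes that element, so the per-step scan-back-and-swap loops disappear.
import Mathlib
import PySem

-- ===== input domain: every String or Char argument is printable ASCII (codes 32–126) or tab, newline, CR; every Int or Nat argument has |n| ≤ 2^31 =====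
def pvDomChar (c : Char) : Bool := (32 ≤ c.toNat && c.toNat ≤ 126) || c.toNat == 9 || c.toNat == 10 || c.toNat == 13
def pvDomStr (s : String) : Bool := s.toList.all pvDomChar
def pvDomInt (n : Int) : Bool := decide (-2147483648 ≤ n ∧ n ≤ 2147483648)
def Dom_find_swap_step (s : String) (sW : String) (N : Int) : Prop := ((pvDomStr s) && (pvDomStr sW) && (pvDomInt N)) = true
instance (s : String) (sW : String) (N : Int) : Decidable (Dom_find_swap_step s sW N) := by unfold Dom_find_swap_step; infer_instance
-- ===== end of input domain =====

-- B replaces A's explicit adjacent-swap bubbling with index-and-remove on the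
-- not-yet-matched remainder list: same result, one plain loop instead of three.


-- ===== PORT A =====
-- inner scan `while s1[i] != s2[j]: j += 1`; `none` = the IndexError Python
-- raises when j runs off the end (excluded by Pre_)
def pvFindJA (c : Char) (s2 : List Char) (j : Nat) : Option Nat :=
  match h : PySem.List.pyGet? s2 (j : Int) with
  | none => none
  | some d => if c = d then some j else pvFindJA c s2 (j + 1)
termination_by s2.length - j
decreasing_by
  have hj : j < s2.length := by
    rw [PySem.List.pyGet?_natCast] at h
    exact (List.getElem?_eq_some_iff.mp h).1
  omega

-- inner loop `while i < j: s2[j], s2[j-1] = s2[j-1], s2[j]; j -= 1; res += 1`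
-- (indices are in range under Pre_, where pySetD/pyGetD are exact)
def pvBubbleA (s2 : List Char) (i j : Nat) (res : Int) : List Char × Int :=
  if i < j then
    let a := PySem.List.pyGetD s2 ((j : Int) - 1) ' '
    let b := PySem.List.pyGetD s2 (j : Int) ' '
    let s2' := PySem.List.pySetD (PySem.List.pySetD s2 (j : Int) a) ((j : Int) - 1) b
    pvBubbleA s2' i (j - 1) (res + 1)
  else (s2, res)
termination_by j

-- outer loop `while i < N`; `none` branches = Python's IndexError (excluded by Pre_)
def pvOuterA (s1 s2 : List Char) (N : Int) (i : Nat) (res : Int) : Int :=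
  if (i : Int) < N then
    match PySem.List.pyGet? s1 (i : Int) with
    | none => res
    | some c =>
      match pvFindJA c s2 i with
      | none => res
      | some j =>
        let p := pvBubbleA s2 i j res
        pvOuterA s1 p.1 N (i + 1) p.2
  else res
termination_by (N - i).toNat
decreasing_by omega

def find_swap_step (s : String) (sW : String) (N : Int) : Int :=
  pvOuterA s.toList sW.toList N 0 0

-- ===== PORT B =====
-- `for i in range(N): j = rest.index(s[i]); res += j; rest.pop(j)`;
-- `none` branches = Python's IndexError/ValueError (excluded by Pre_)
def pvLoopB (s1 rest : List Char) (N : Int) (i : Nat) (res : Int) : Int :=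
  if (i : Int) < N then
    match PySem.List.pyGet? s1 (i : Int) with
    | none => res
    | some c =>
      match PySem.List.index? rest c with
      | none => res
      | some j =>
        match PySem.List.pop? rest (j : Int) with
        | none => res
        | some r => pvLoopB s1 r.2 N (i + 1) (res + j)
  else res
termination_by (N - i).toNat
decreasing_by omega

def find_swap_step_alt (s : String) (sW : String) (N : Int) : Int :=
  pvLoopB s.toList sW.toList N 0 0

-- ===== PRECONDITION & SPEC =====
-- Pre_ excludes exactly the inputs on which Python A raises IndexError:
-- N beyond len(s), or some prefix of s[:N] needing more copies of a character
-- than sW contains (the inner scan then runs off the end of s2).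
def Pre_find_swap_step (s : String) (sW : String) (N : Int) : Prop :=
  N ≤ (s.toList.length : Int) ∧
    ((s.toList.take N.toNat).all
      (fun c => decide ((s.toList.take N.toNat).count c ≤ sW.toList.count c)) = true)
instance (s : String) (sW : String) (N : Int) : Decidable (Pre_find_swap_step s sW N) := by
  unfold Pre_find_swap_step; infer_instance

def pvWitness_find_swap_step : String × String × Int := ("ab", "ba", 2)

def Spec_find_swap_step (s : String) (sW : String) (N : Int) (out : Int) : Prop :=
  out = find_swap_step_alt s sW N
instance (s : String) (sW : String) (N : Int) (out : Int) : Decidable (Spec_find_swap_step s sW N out) := by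
  unfold Spec_find_swap_step; infer_instance

-- ===== CLAIM (what is proved, stated in full; the proofs are below) =====
def Claim_equal_find_swap_step : Prop :=
  ∀ (s : String) (sW : String) (N : Int), Dom_find_swap_step s sW N →
    Pre_find_swap_step s sW N → Spec_find_swap_step s sW N (find_swap_step s sW N)

-- ===== LEMMAS AND PROOFS =====

-- A's scan from position front.length of front ++ rest is B's index? on rest.
lemma pvFindJA_append (c : Char) :
    ∀ (rest front : List Char),
      pvFindJA c (front ++ rest) front.length
        = (PySem.List.index? rest c).map (fun j => j + front.length) := by
  intro rest
  induction rest with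
  | nil =>
      intro front
      rw [pvFindJA]
      split
      · simp
      · rename_i d h
        rw [PySem.List.pyGet?_natCast] at h
        simp at h
  | cons r rs ih =>
      intro front
      rw [pvFindJA]
      have hget : PySem.List.pyGet? (front ++ r :: rs) ((front.length : Nat) : Int)
          = some r := PySem.List.pyGet?_append_length front rs r
      split
      · rename_i h
        rw [hget] at h
        exact absurd h (by simp)
      · rename_i d h
        rw [hget] at h
        obtain rfl : r = d := by injection h
        by_cases hc : c = r
        · subst hc
          rw [if_pos rfl, PySem.List.index?_cons_self]
          simp
        · have h2 : pvFindJA c (front ++ r :: rs) (front.length + 1)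
              = pvFindJA c ((front ++ [r]) ++ rs) (front ++ [r]).length := by
            simp
          rw [if_neg hc, h2, ih (front ++ [r]),
              PySem.List.index?_cons_of_ne rs (Ne.symm hc)]
          cases PySem.List.index? rs c with
          | none => simp
          | some k => simp; omega

lemma eraseIdx_append_cons (pre : List Char) (c : Char) (suf : List Char) :
    (pre ++ c :: suf).eraseIdx pre.length = pre ++ suf := by
  induction pre with
  | nil => simp
  | cons x xs ih => simpa [List.eraseIdx] using ih

-- the bubble loop moves the matched character to the front of the remainder,
-- costing one swap per skipped character
lemma pvBubbleA_eq (front : List Char) (c : Char) :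
    ∀ (pre suf : List Char) (res : Int),
      pvBubbleA (front ++ pre ++ c :: suf) front.length (front.length + pre.length) res
        = (front ++ c :: pre ++ suf, res + pre.length) := by
  intro pre
  induction pre using List.reverseRecOn with
  | nil =>
      intro suf res
      rw [pvBubbleA]
      simp
  | append_singleton a x ih =>
      intro suf res
      rw [pvBubbleA]
      have hlt : front.length < front.length + (a ++ [x]).length := by simp
      rw [if_pos hlt]
      have hu : front ++ (a ++ [x]) ++ c :: suf = (front ++ a) ++ x :: c :: suf := by
        simp
      have hread1 : PySem.List.pyGetD (front ++ (a ++ [x]) ++ c :: suf)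
          (((front.length + (a ++ [x]).length : Nat) : Int) - 1) ' ' = x := by
        rw [hu, show ((front.length + (a ++ [x]).length : Nat) : Int) - 1
            = (((front ++ a).length : Nat) : Int) by simp; omega,
          PySem.List.pyGetD_natCast,
          List.getD_append_right (front ++ a) _ _ _ (Nat.le_refl _)]
        simp
      have hread2 : PySem.List.pyGetD (front ++ (a ++ [x]) ++ c :: suf)
          ((front.length + (a ++ [x]).length : Nat) : Int) ' ' = c := by
        rw [hu, show ((front.length + (a ++ [x]).length : Nat) : Int)
            = (((front ++ a).length + 1 : Nat) : Int) by simp; omega,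
          PySem.List.pyGetD_natCast,
          List.getD_append_right (front ++ a) _ _ _ (by omega)]
        rw [show (front ++ a).length + 1 - (front ++ a).length = 1 by omega]
        rfl
      have hwrite : PySem.List.pySetD (PySem.List.pySetD (front ++ (a ++ [x]) ++ c :: suf)
            ((front.length + (a ++ [x]).length : Nat) : Int)
            (PySem.List.pyGetD (front ++ (a ++ [x]) ++ c :: suf)
              (((front.length + (a ++ [x]).length : Nat) : Int) - 1) ' '))
            (((front.length + (a ++ [x]).length : Nat) : Int) - 1)
            (PySem.List.pyGetD (front ++ (a ++ [x]) ++ c :: suf)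
              ((front.length + (a ++ [x]).length : Nat) : Int) ' ')
          = front ++ a ++ c :: x :: suf := by
        rw [hread1, hread2, hu,
          show ((front.length + (a ++ [x]).length : Nat) : Int)
            = (((front ++ a).length + 1 : Nat) : Int) by simp; omega,
          PySem.List.pySetD_natCast,
          show (((front ++ a).length + 1 : Nat) : Int) - 1
            = (((front ++ a).length : Nat) : Int) by push_cast; ring,
          PySem.List.pySetD_natCast]
        rw [List.set_append, if_neg (by omega)]
        rw [show (front ++ a).length + 1 - (front ++ a).length = 1 by omega]
        rw [List.set_append, if_neg (by omega), Nat.sub_self]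
        simp [List.set]
      simp only [hwrite]
      rw [show front.length + (a ++ [x]).length - 1 = front.length + a.length by
        simp]
      rw [ih (x :: suf) (res + 1)]
      refine Prod.ext ?_ ?_
      · simp
      · simp; ring

-- main loop correspondence: A's array is (matched prefix) ++ (B's remainder)
lemma pvOuterA_eq_pvLoopB (s1 : List Char) (N : Int) :
    ∀ (n : Nat) (front rest : List Char) (res : Int),
      (N - front.length).toNat ≤ n →
      pvOuterA s1 (front ++ rest) N front.length res
        = pvLoopB s1 rest N front.length res := by
  intro n
  induction n with
  | zero =>
      intro front rest res hn
      rw [pvOuterA, pvLoopB]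
      have : ¬ ((front.length : Int) < N) := by omega
      rw [if_neg this, if_neg this]
  | succ m ih =>
      intro front rest res hn
      rw [pvOuterA, pvLoopB]
      by_cases hi : (front.length : Int) < N
      · rw [if_pos hi, if_pos hi]
        cases hget : PySem.List.pyGet? s1 ((front.length : Nat) : Int) with
        | none => simp only
        | some c =>
          simp only [pvFindJA_append]
          cases hidx : PySem.List.index? rest c with
          | none => simp only [Option.map_none]
          | some j =>
            simp only [Option.map_some]
            obtain ⟨pre, suf, hrest, hlen, -⟩ :=
              (PySem.List.index?_eq_some_iff rest c j).mp hidx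
            have hjlt : j < rest.length := by
              subst hrest; simp [← hlen]
            have hpop : PySem.List.pop? rest ((j : Nat) : Int)
                = some (rest[j], rest.eraseIdx j) :=
              PySem.List.pop?_natCast rest j hjlt
            simp only [hpop]
            subst hrest
            have herase : (pre ++ c :: suf).eraseIdx j = pre ++ suf := by
              rw [← hlen]; exact eraseIdx_append_cons pre c suf
            have hbub := pvBubbleA_eq front c pre suf res
            rw [List.append_assoc] at hbub
            rw [show j + front.length = front.length + pre.length by omega, hbub]
            have hfc : front ++ c :: pre ++ suf = (front ++ [c]) ++ (pre ++ suf) := by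
              simp
            have hlen1 : front.length + 1 = (front ++ [c]).length := by simp
            rw [herase, hfc, hlen1,
                ih (front ++ [c]) (pre ++ suf) (res + (pre.length : Int))
                  (by simp; omega)]
            have hj : (j : Int) = (pre.length : Int) := by omega
            rw [hj]
      · rw [if_neg hi, if_neg hi]

-- ===== VERDICT (by name: the statement is the Claim_ definition above) =====
theorem find_swap_step_spec : Claim_equal_find_swap_step := by
  intro s sW N _ _
  unfold Spec_find_swap_step find_swap_step find_swap_step_alt
  have h := pvOuterA_eq_pvLoopB s.toList N (N - 0).toNat ([] : List Char)
      sW.toList 0 (by simp)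
  simpa using h
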